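-- pv_equiv track=rewrite | github.com/zw15772/seasonal_greening | ly_legacy.py | __split_999999
-- ===== SOURCE A (Python) =====
-- def __split_999999(selected_indx):
--     # selected_indx = [999999, 999999, 68, 69, 70, 71, 72, 73, 74, 75, 76, 77, 78, 79]
--     selected_indx_ = []
--     selected_indx_s = []
--     for i in selected_indx:
--         if i > 9999:
--             if len(selected_indx_) > 0:
--                 selected_indx_s.append(selected_indx_)
--             selected_indx_ = []
--             continue
--         else:
--             selected_indx_.append(i)
--     if len(selected_indx_) > 0:
--         selected_indx_s.append(selected_indx_)
--     if len(selected_indx_s) == 0: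
--         return None
--     return selected_indx_s[0]
--     pass
-- ===== SOURCE B (Python) =====
-- from itertools import dropwhile, takewhile
--
-- def __split_999999(selected_indx):
--     g = list(takewhile(lambda x: x <= 9999, dropwhile(lambda x: x > 9999, selected_indx)))
--     return g or None
-- ===== Notes on version B (the rewrite author's own statement) =====
-- stated objective: simpler
-- what changed: Replaced the loop that accumulates every group into a list-of-lists with a single dropwhile/takewhile pass that extracts only the first non-sentinel run.
import Mathlib
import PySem

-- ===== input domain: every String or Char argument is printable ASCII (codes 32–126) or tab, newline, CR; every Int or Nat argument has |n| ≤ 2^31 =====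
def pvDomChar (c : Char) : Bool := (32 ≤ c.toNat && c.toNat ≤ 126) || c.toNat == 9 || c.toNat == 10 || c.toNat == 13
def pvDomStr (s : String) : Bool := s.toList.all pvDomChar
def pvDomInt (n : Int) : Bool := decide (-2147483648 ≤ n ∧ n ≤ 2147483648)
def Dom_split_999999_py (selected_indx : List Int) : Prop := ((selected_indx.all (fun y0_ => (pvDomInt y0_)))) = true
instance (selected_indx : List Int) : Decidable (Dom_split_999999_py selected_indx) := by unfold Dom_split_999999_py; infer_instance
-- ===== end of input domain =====

-- B replaces A's accumulate-all-groups loop by a single dropWhile/takeWhile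
-- extraction of the first non-sentinel run (objective: simpler).

-- ===== PORT A =====
-- loop body: state = (selected_indx_, selected_indx_s)
def splitStep (st : List Int × List (List Int)) (i : Int) : List Int × List (List Int) :=
  if i > 9999 then
    ([], if st.1.length > 0 then st.2 ++ [st.1] else st.2)
  else
    (st.1 ++ [i], st.2)

-- post-loop: final append of the open group, then `selected_indx_s[0]` guarded by emptiness
def splitFinish (st : List Int × List (List Int)) : Option (List Int) :=
  let gs := if st.1.length > 0 then st.2 ++ [st.1] else st.2
  match gs with
  | [] => none
  | g :: _ => some g

def split_999999_py (selected_indx : List Int) : Option (List Int) :=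
  splitFinish (selected_indx.foldl splitStep ([], []))

-- ===== PORT B =====
def split_999999_py_alt (selected_indx : List Int) : Option (List Int) :=
  let g := (selected_indx.dropWhile (fun x => decide (x > 9999))).takeWhile
             (fun x => decide (x ≤ 9999))
  if g = [] then none else some g

-- ===== PRECONDITION & SPEC =====
def Spec_split_999999_py (selected_indx : List Int) (out : Option (List Int)) : Prop := out = split_999999_py_alt selected_indx
instance (selected_indx : List Int) (out : Option (List Int)) : Decidable (Spec_split_999999_py selected_indx out) := by unfold Spec_split_999999_py; infer_instance

-- ===== CLAIM (what is proved, stated in full; the proofs are below) =====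
def Claim_equal_split_999999_py : Prop := ∀ (selected_indx : List Int), Dom_split_999999_py selected_indx → Spec_split_999999_py selected_indx (split_999999_py selected_indx)

-- ===== LEMMAS AND PROOFS =====

-- once a first group g is closed, the final result is g, whatever follows
theorem splitFinish_closed (l : List Int) :
    ∀ (cur : List Int) (g : List Int) (gs : List (List Int)),
      splitFinish (l.foldl splitStep (cur, g :: gs)) = some g := by
  induction l with
  | nil =>
    intro cur g gs
    simp only [List.foldl, splitFinish]
    split_ifs <;> simp
  | cons h t ih =>
    intro cur g gs
    simp only [List.foldl, splitStep]
    split_ifs with h1 h2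
    · exact ih [] g (gs ++ [cur])
    · exact ih [] g gs
    · exact ih (cur ++ [h]) g gs

-- an open nonempty group collects exactly the following run of non-sentinel values
theorem splitFinish_open (l : List Int) :
    ∀ (cur : List Int), cur ≠ [] →
      splitFinish (l.foldl splitStep (cur, [])) =
        some (cur ++ l.takeWhile (fun x => decide (x ≤ 9999))) := by
  induction l with
  | nil =>
    intro cur hc
    simp only [List.foldl, splitFinish, List.takeWhile]
    have : cur.length > 0 := List.length_pos_iff.mpr hc
    simp [this]
  | cons h t ih =>
    intro cur hc
    simp only [List.foldl, splitStep]
    by_cases h1 : h > 9999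
    · have hlen : cur.length > 0 := List.length_pos_iff.mpr hc
      have h2 : ¬ (h ≤ 9999) := by omega
      simp only [if_pos h1, if_pos hlen, List.nil_append]
      rw [splitFinish_closed t [] cur []]
      simp [List.takeWhile, h2]
    · rw [if_neg h1, ih (cur ++ [h]) (by simp)]
      have : h ≤ 9999 := by omega
      simp [List.takeWhile, this]

theorem split_eq (l : List Int) : split_999999_py l = split_999999_py_alt l := by
  induction l with
  | nil => rfl
  | cons h t ih =>
    by_cases h1 : h > 9999
    · have hA : split_999999_py (h :: t) = split_999999_py t := by
        simp [split_999999_py, List.foldl, splitStep, h1]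
      have hB : split_999999_py_alt (h :: t) = split_999999_py_alt t := by
        simp [split_999999_py_alt, List.dropWhile, h1]
      rw [hA, hB, ih]
    · have h2 : h ≤ 9999 := by omega
      have hA : split_999999_py (h :: t) =
          some (h :: t.takeWhile (fun x => decide (x ≤ 9999))) := by
        simp only [split_999999_py, List.foldl, splitStep, h1, if_false]
        simpa using splitFinish_open t [h] (by simp)
      rw [hA]
      simp [split_999999_py_alt, List.dropWhile, List.takeWhile, h1, h2]

-- ===== VERDICT (by name: the statement is the Claim_ definition above) =====
theorem split_999999_py_spec : Claim_equal_split_999999_py := by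
  intro l _
  exact split_eq l
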